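-- pv_equiv track=rewrite | github.com/Galbaz1/tavus-examples | examples/cvi-ui-conversation/backend/Agent1.py | is_ctbto_related
-- ===== SOURCE A (Python) =====
-- def is_ctbto_related(message: str) -> bool:
--     """
--     Check if a message is related to CTBTO topics.
--
--     Args:
--         message (str): The message to check
--
--     Returns:
--         bool: True if CTBTO-related, False otherwise
--     """
--     ctbto_keywords = [
--         "ctbto", "comprehensive nuclear test ban", "nuclear test",
--         "nuclear monitoring", "test ban treaty", "nuclear verification",
--         "nuclear explosion", "seismic monitoring", "radionuclide",
--         "infrasound", "hydroacoustic", "ims", "international monitoring system"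
--     ]
--
--     message_lower = message.lower()
--     return any(keyword in message_lower for keyword in ctbto_keywords)
-- ===== SOURCE B (Python) =====
-- CTBTO_KEYWORDS = [
--     "ctbto", "comprehensive nuclear test ban", "nuclear test",
--     "nuclear monitoring", "test ban treaty", "nuclear verification",
--     "nuclear explosion", "seismic monitoring", "radionuclide",
--     "infrasound", "hydroacoustic", "ims", "international monitoring system",
-- ]
--
--
-- def _char_masks(keyword):
--     # bit j of masks[c] is set iff keyword[j] == c
--     masks = {}
--     for j, c in enumerate(keyword):
--         masks[c] = masks.get(c, 0) | (1 << j)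
--     return masks
--
--
-- def _shift_and(keyword, text):
--     # Baeza-Yates--Gonnet Shift-And: bit-parallel NFA simulation; bit j of d
--     # is set iff keyword[:j+1] is a suffix of the text consumed so far.
--     masks = _char_masks(keyword)
--     accept = 1 << (len(keyword) - 1)
--     d = 0
--     for c in text:
--         d = ((d << 1) | 1) & masks.get(c, 0)
--         if d & accept:
--             return True
--     return False
--
--
-- def is_ctbto_related(message: str) -> bool:
--     m = message.lower()
--     return any(_shift_and(k, m) for k in CTBTO_KEYWORDS)
-- ===== Notes on version B (the rewrite author's own statement) =====
-- stated objective: alternative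
-- what changed: Replaced the per-keyword substring-membership searches by the Shift-And bit-parallel algorithm: for each keyword a char-to-bitmask table is built once and a single pass over the lowered message updates an NFA state word, reporting a match when the accept bit fires.
import Mathlib
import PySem

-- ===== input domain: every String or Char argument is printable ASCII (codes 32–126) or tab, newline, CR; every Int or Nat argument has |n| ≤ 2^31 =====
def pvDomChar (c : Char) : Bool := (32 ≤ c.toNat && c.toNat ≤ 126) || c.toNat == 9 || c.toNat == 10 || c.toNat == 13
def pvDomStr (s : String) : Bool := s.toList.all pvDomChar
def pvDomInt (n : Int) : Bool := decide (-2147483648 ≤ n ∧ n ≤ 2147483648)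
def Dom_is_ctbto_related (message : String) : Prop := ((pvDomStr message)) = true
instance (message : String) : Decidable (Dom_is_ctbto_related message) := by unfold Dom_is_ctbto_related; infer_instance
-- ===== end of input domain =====

-- B replaces A's one-substring-search-per-keyword loop by the Shift-And bit-parallel
-- algorithm (Baeza-Yates–Gonnet): per keyword a char→bitmask table and a single pass
-- updating an NFA state word (alternative algorithm, similar cost).

def ctbtoKeywords : List String :=
  ["ctbto", "comprehensive nuclear test ban", "nuclear test",
   "nuclear monitoring", "test ban treaty", "nuclear verification",
   "nuclear explosion", "seismic monitoring", "radionuclide",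
   "infrasound", "hydroacoustic", "ims", "international monitoring system"]

-- ===== PORT A =====
-- any(keyword in message_lower for keyword in ctbto_keywords)
def is_ctbto_related (message : String) : Bool :=
  let messageLower := PySem.Str.lower message
  ctbtoKeywords.any (fun keyword => PySem.Str.isIn keyword messageLower)

-- ===== PORT B =====
-- _char_masks: masks[c] |= 1 << j for j, c in enumerate(keyword).
-- All Python ints here are nonnegative bitmasks, ported as Nat (bit operations agree).
def charMasks (keyword : List Char) : PySem.Dict Char Nat :=
  keyword.zipIdx.foldl
    (fun masks p => masks.insert p.1 ((masks.getD p.1 0) ||| (1 <<< p.2)))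
    PySem.Dict.empty

-- the 'for c in text' loop of _shift_and, with its early return
def shiftAndLoop (masks : PySem.Dict Char Nat) (accept : Nat) (d : Nat) : List Char → Bool
  | [] => false
  | c :: cs =>
    let d' := ((d <<< 1) ||| 1) &&& masks.getD c 0
    if d' &&& accept ≠ 0 then true else shiftAndLoop masks accept d' cs

def shiftAnd (keyword : String) (text : List Char) : Bool :=
  let kl := keyword.toList
  shiftAndLoop (charMasks kl) (1 <<< (kl.length - 1)) 0 text

def is_ctbto_related_alt (message : String) : Bool :=
  let m := (PySem.Str.lower message).toList
  ctbtoKeywords.any (fun k => shiftAnd k m)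

-- ===== PRECONDITION & SPEC =====
def Spec_is_ctbto_related (message : String) (out : Bool) : Prop := out = is_ctbto_related_alt message
instance (message : String) (out : Bool) : Decidable (Spec_is_ctbto_related message out) := by unfold Spec_is_ctbto_related; infer_instance

-- ===== CLAIM (what is proved, stated in full; the proofs are below) =====
def Claim_equal_is_ctbto_related : Prop := ∀ (message : String), Dom_is_ctbto_related message → Spec_is_ctbto_related message (is_ctbto_related message)

-- ===== LEMMAS AND PROOFS =====

-- bit j of d is set iff the first j+1 characters of the keyword are a suffix of the consumed text
def SAInv (kl p : List Char) (d : Nat) : Prop :=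
  ∀ j : Nat, d.testBit j = true ↔ (j < kl.length ∧ kl.take (j + 1) <:+ p)

theorem testBit_one (j : Nat) : (1 : Nat).testBit j = decide (j = 0) := by
  rw [show (1 : Nat) = 2 ^ 0 by norm_num, Nat.testBit_two_pow]
  simp [eq_comm]

theorem and_shiftLeft_one_ne_zero (x n : Nat) : (x &&& 1 <<< n ≠ 0) ↔ x.testBit n = true := by
  rw [Nat.one_shiftLeft]
  constructor
  · intro h
    rcases Nat.exists_most_significant_bit h with ⟨i, hi, -⟩
    rw [Nat.testBit_and, Nat.testBit_two_pow] at hi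
    rcases Bool.and_eq_true_iff.mp hi with ⟨h1, h2⟩
    simpa [decide_eq_true_iff.mp h2] using h1
  · intro h h0
    have hb : (x &&& 2 ^ n).testBit n = false := by simp [h0]
    rw [Nat.testBit_and, Nat.testBit_two_pow, h] at hb
    simp at hb

theorem concat_suffix_concat (a c : Char) (l p : List Char) :
    (l ++ [a] <:+ p ++ [c]) ↔ l <:+ p ∧ a = c := by
  constructor
  · rintro ⟨t, ht⟩
    rw [show t ++ (l ++ [a]) = (t ++ l) ++ [a] by simp] at ht
    rw [← List.concat_eq_append, ← List.concat_eq_append] at ht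
    have := List.concat_inj.mp ht
    exact ⟨⟨t, this.1⟩, this.2⟩
  · rintro ⟨⟨t, ht⟩, rfl⟩
    exact ⟨t, by simp [← ht]⟩

theorem infix_iff_suffix_of_prefix (l m : List Char) : l <:+: m ↔ ∃ t, t <+: m ∧ l <:+ t := by
  constructor
  · rintro ⟨s, t, rfl⟩
    exact ⟨s ++ l, ⟨t, by simp⟩, ⟨s, rfl⟩⟩
  · rintro ⟨t, ⟨r, rfl⟩, ⟨s, rfl⟩⟩
    exact ⟨s, r, by simp⟩

theorem prefix_cons_ne_nil (q : List Char) (c : Char) (cs : List Char)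
    (h : q <+: c :: cs) (hne : q ≠ []) : ∃ q', q = c :: q' ∧ q' <+: cs := by
  match q, h with
  | [], _ => exact absurd rfl hne
  | x :: q', h =>
    rw [List.cons_prefix_cons] at h
    exact ⟨q', by simp [h.1], h.2⟩

-- the mask table built by charMasks: bit j of masks[c] is set iff keyword[j] == c
theorem charMasks_testBit (kl : List Char) (c : Char) (j : Nat) :
    ((charMasks kl).getD c 0).testBit j = true ↔ kl[j]? = some c := by
  induction kl using List.reverseRecOn with
  | nil =>
    simp [charMasks, PySem.Dict.empty, PySem.Dict.getD, PySem.Dict.get?, Nat.zero_testBit]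
  | append_singleton xs x ih =>
    have hstep : charMasks (xs ++ [x])
        = (charMasks xs).insert x ((charMasks xs).getD x 0 ||| (1 <<< xs.length)) := by
      unfold charMasks
      rw [List.zipIdx_append, List.foldl_append]
      simp
    rw [hstep, PySem.Dict.getD_insert]
    by_cases hc : c = x
    · rw [if_pos hc]
      subst hc
      simp only [Nat.testBit_or, Bool.or_eq_true, ih, Nat.one_shiftLeft,
        Nat.testBit_two_pow, decide_eq_true_eq]
      rcases Nat.lt_trichotomy j xs.length with hj | hj | hj
      · rw [List.getElem?_append_left hj]
        exact or_iff_left (by omega : ¬ xs.length = j)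
      · subst hj
        rw [List.getElem?_append_right (le_refl _)]
        simp
      · rw [List.getElem?_eq_none (by simp; omega : (xs ++ [c]).length ≤ j)]
        simp only [reduceCtorEq, iff_false]
        rintro (h | h)
        · exact absurd ((List.getElem?_eq_some_iff.mp h).1) (by omega)
        · omega
    · rw [if_neg hc, ih]
      rcases Nat.lt_trichotomy j xs.length with hj | hj | hj
      · rw [List.getElem?_append_left hj]
      · subst hj
        rw [List.getElem?_append_right (le_refl _),
          List.getElem?_eq_none_iff.mpr (by omega : xs.length ≤ xs.length)]
        simp only [Nat.sub_self, List.getElem?_cons_zero, reduceCtorEq, false_iff,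
          Option.some.injEq]
        intro h
        exact hc h.symm
      · rw [List.getElem?_eq_none (by omega : xs.length ≤ j),
          List.getElem?_eq_none (by simp; omega : (xs ++ [x]).length ≤ j)]

-- one step of the scan preserves the invariant
theorem SAInv_step (kl p : List Char) (d : Nat) (c : Char) (hk : kl ≠ [])
    (hinv : SAInv kl p d) :
    SAInv kl (p ++ [c]) (((d <<< 1) ||| 1) &&& (charMasks kl).getD c 0) := by
  intro j
  rw [Nat.testBit_and, Bool.and_eq_true, Nat.testBit_or, Bool.or_eq_true,
    Nat.testBit_shiftLeft, testBit_one]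
  cases j with
  | zero =>
    have hlen : 0 < kl.length := List.length_pos_iff.mpr hk
    have htake : kl.take 1 = [] ++ [kl[0]] := by
      rw [List.take_one]
      simp [List.head?_eq_getElem?, List.getElem?_eq_getElem hlen]
    simp only [show ¬ ((0:Nat) ≥ 1) from by omega, decide_false, Bool.false_and,
      Bool.false_eq_true, false_or, decide_true, true_and]
    rw [charMasks_testBit]
    constructor
    · intro h
      rcases List.getElem?_eq_some_iff.mp h with ⟨hh, hv⟩
      refine ⟨hlen, ?_⟩
      rw [htake, concat_suffix_concat]
      exact ⟨List.nil_suffix, hv⟩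
    · rintro ⟨-, hsuf⟩
      rw [htake, concat_suffix_concat] at hsuf
      exact List.getElem?_eq_some_iff.mpr ⟨hlen, hsuf.2⟩
  | succ jj =>
    have hd : decide (jj + 1 ≥ 1) = true := by simp
    simp only [Nat.succ_sub_one, decide_eq_true_eq, hd, Bool.true_and]
    rw [charMasks_testBit, hinv jj]
    constructor
    · rintro ⟨(⟨hjj, hsuf⟩ | h), hget⟩
      · rcases List.getElem?_eq_some_iff.mp hget with ⟨hlt, hv⟩
        refine ⟨hlt, ?_⟩
        rw [List.take_add_one, List.getElem?_eq_getElem hlt]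
        simp only [Option.toList_some]
        rw [concat_suffix_concat]
        exact ⟨hsuf, hv⟩
      · omega
    · rintro ⟨hlt, hsuf⟩
      rw [List.take_add_one, List.getElem?_eq_getElem hlt] at hsuf
      simp only [Option.toList_some] at hsuf
      rw [concat_suffix_concat] at hsuf
      exact ⟨Or.inl ⟨by omega, hsuf.1⟩, List.getElem?_eq_some_iff.mpr ⟨hlt, hsuf.2⟩⟩

-- acceptance bit of the state after a step ↔ the keyword is a suffix of the consumed text
theorem accept_iff (kl p : List Char) (d : Nat) (hk : kl ≠ []) (hinv : SAInv kl p d) :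
    (d &&& 1 <<< (kl.length - 1) ≠ 0) ↔ kl <:+ p := by
  rw [and_shiftLeft_one_ne_zero, hinv]
  have hlen : 0 < kl.length := List.length_pos_iff.mpr hk
  have : kl.length - 1 + 1 = kl.length := by omega
  rw [this, List.take_length]
  constructor
  · exact fun h => h.2
  · exact fun h => ⟨by omega, h⟩

-- the scan loop finds exactly the nonempty prefixes of the remaining text
-- after which the keyword is a suffix of everything consumed
theorem shiftAndLoop_iff (kl : List Char) (hk : kl ≠ []) :
    ∀ (s p : List Char) (d : Nat), SAInv kl p d →
      (shiftAndLoop (charMasks kl) (1 <<< (kl.length - 1)) d s = true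
        ↔ ∃ q, q <+: s ∧ q ≠ [] ∧ kl <:+ p ++ q) := by
  intro s
  induction s with
  | nil =>
    intro p d _
    simp only [shiftAndLoop, Bool.false_eq_true, false_iff]
    rintro ⟨q, hq, hne, -⟩
    exact hne (List.prefix_nil.mp hq)
  | cons c cs ih =>
    intro p d hinv
    have hinv' := SAInv_step kl p d c hk hinv
    simp only [shiftAndLoop]
    by_cases hacc :
        (((d <<< 1) ||| 1) &&& (charMasks kl).getD c 0) &&& 1 <<< (kl.length - 1) ≠ 0
    · rw [if_pos hacc]
      simp only [true_iff]
      exact ⟨[c], by simp, by simp, (accept_iff kl _ _ hk hinv').mp hacc⟩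
    · rw [if_neg hacc]
      rw [ih (p ++ [c]) _ hinv']
      constructor
      · rintro ⟨q, hq, hne, hsuf⟩
        exact ⟨c :: q, by simpa [List.cons_prefix_cons] using hq, by simp,
          by simpa [List.append_assoc] using hsuf⟩
      · rintro ⟨q, hq, hne, hsuf⟩
        rcases prefix_cons_ne_nil q c cs hq hne with ⟨q', rfl, hq'⟩
        cases q' with
        | nil =>
          exact absurd ((accept_iff kl _ _ hk hinv').mpr (by simpa using hsuf)) hacc
        | cons x t =>
          exact ⟨x :: t, hq', by simp, by simpa [List.append_assoc] using hsuf⟩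

-- Shift-And decides substring membership for a nonempty keyword
theorem shiftAnd_eq_isIn (k : String) (hk : k.toList ≠ []) (m : List Char) :
    shiftAnd k m = PySem.Chars.isIn k.toList m := by
  have hinv0 : SAInv k.toList [] 0 := by
    intro j
    simp only [Nat.zero_testBit, Bool.false_eq_true, false_iff, not_and]
    intro _ hsuf
    have := List.suffix_nil.mp hsuf
    rw [List.take_eq_nil_iff] at this
    rcases this with h | h
    · omega
    · exact absurd h hk
  rw [Bool.eq_iff_iff, PySem.Chars.isIn_iff_infix]
  unfold shiftAnd
  rw [shiftAndLoop_iff k.toList hk m [] 0 hinv0, infix_iff_suffix_of_prefix]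
  constructor
  · rintro ⟨q, hq, -, hsuf⟩
    exact ⟨q, hq, by simpa using hsuf⟩
  · rintro ⟨t, ht, hsuf⟩
    refine ⟨t, ht, ?_, by simpa using hsuf⟩
    rintro rfl
    exact hk (List.suffix_nil.mp hsuf)

-- ===== VERDICT (by name: the statement is the Claim_ definition above) =====
theorem is_ctbto_related_spec : Claim_equal_is_ctbto_related := by
  intro message _
  unfold Spec_is_ctbto_related is_ctbto_related is_ctbto_related_alt
  refine (PySem.List.any_congr_mem ?_).symm
  intro k hk
  have hne : ∀ k ∈ ctbtoKeywords, k.toList ≠ [] := by decide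
  rw [shiftAnd_eq_isIn k (hne k hk) _]
  simp [PySem.Str.isIn]
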